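-- pv_equiv track=rewrite | github.com/volcengine/verl | atropos/environments/intern_bootcamp/internbootcamp_lib/internbootcamp/bootcamp/f2longcolorfulstrip/f2longcolorfulstrip.py | compute_answer
-- ===== SOURCE A (Python) =====
-- MOD = 998244353
--
-- def compute_answer(n_input, m_input, c_list):
--     # Correctly map problem's n (number of colors) and m (strip length) to reference code's variables
--     m_code = n_input  # Reference code's m represents problem's n (number of colors)
--     n_code = m_input  # Reference code's n represents problem's m (strip length)
--
--     C = [x - 1 for x in c_list]
--
--     # Compress consecutive duplicates
--     if not C:
--         return 0
--     C2 = [C[0]]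
--     for c in C[1:]:
--         if C2[-1] != c:
--             C2.append(c)
--     new_n = len(C2)
--
--     # Check if compressed length exceeds 2*m_code (problem's n)
--     if new_n > 2 * m_code:
--         return 0
--
--     pos = [[] for _ in range(m_code)]
--     for i in range(new_n):
--         c = C2[i]
--         if c >= m_code or c < 0:
--             return 0
--         pos[c].append(i)
--
--     # Verify all colors are present
--     for color in range(m_code):
--         if not pos[color]:
--             return 0
--
--     DP = [[1] * (new_n + 1) for _ in range(new_n + 1)]
--
--     for le in range(1, new_n + 1):
--         for i in range(new_n - le + 1):
--             j = i + le
--             min_color = min(C2[i:j])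
--             min_indices = [p for p in range(i, j) if C2[p] == min_color]
--             if not min_indices:
--                 DP[i][j] = 0
--                 continue
--
--             first = min(min_indices)
--             last = max(min_indices)
--
--             # Calculate left part
--             left = 0
--             for k in range(i, first + 1):
--                 left = (left + DP[i][k] * DP[k][first]) % MOD
--
--             # Calculate right part
--             right = 0
--             for k in range(last + 1, j + 1):
--                 right = (right + DP[last + 1][k] * DP[k][j]) % MOD
--
--             # Calculate middle parts between occurrences of min_color
--             middle = 1
--             color_positions = pos[min_color]
--             for idx in range(len(color_positions) - 1):
--                 prev = color_positions[idx]
--                 next_p = color_positions[idx + 1]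
--                 if prev < i or next_p >= j:
--                     continue
--                 middle = (middle * DP[prev + 1][next_p]) % MOD
--
--             DP[i][j] = (left * right % MOD) * middle % MOD
--
--     return DP[0][new_n]
-- ===== SOURCE B (Python) =====
-- MOD = 998244353
--
-- def compute_answer(n_input, m_input, c_list):
--     # Top-down memoized recursion over intervals instead of A's bottom-up
--     # length-indexed DP table; preprocessing and the recurrence are the same.
--     m_code = n_input
--     C = [x - 1 for x in c_list]
--     if not C:
--         return 0
--     C2 = [C[0]]
--     for c in C[1:]:
--         if C2[-1] != c:
--             C2.append(c)
--     new_n = len(C2)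
--     if new_n > 2 * m_code:
--         return 0
--     pos = [[] for _ in range(m_code)]
--     for i in range(new_n):
--         c = C2[i]
--         if c >= m_code or c < 0:
--             return 0
--         pos[c].append(i)
--     for color in range(m_code):
--         if not pos[color]:
--             return 0
--
--     memo = {}
--
--     def f(i, j):
--         if j - i <= 0:
--             return 1
--         key = (i, j)
--         if key in memo:
--             return memo[key]
--         min_color = min(C2[i:j])
--         min_indices = [p for p in range(i, j) if C2[p] == min_color]
--         first = min(min_indices)
--         last = max(min_indices)
--         left = 0
--         for k in range(i, first + 1):
--             left = (left + f(i, k) * f(k, first)) % MOD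
--         right = 0
--         for k in range(last + 1, j + 1):
--             right = (right + f(last + 1, k) * f(k, j)) % MOD
--         middle = 1
--         color_positions = pos[min_color]
--         for idx in range(len(color_positions) - 1):
--             prev = color_positions[idx]
--             next_p = color_positions[idx + 1]
--             if prev < i or next_p >= j:
--                 continue
--             middle = (middle * f(prev + 1, next_p)) % MOD
--         res = (left * right % MOD) * middle % MOD
--         memo[key] = res
--         return res
--
--     return f(0, new_n)
-- ===== Notes on version B (the rewrite author's own statement) =====
-- stated objective: alternative
-- what changed: A fills a full bottom-up (length-indexed) DP table of all intervals; B replaces the table by a top-down recursion f(i,j) with a memo dict, computing the same recurrence only for the intervals actually reachable from (0, new_n); preprocessing and the per-interval recurrence are unchanged.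
import Mathlib
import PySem

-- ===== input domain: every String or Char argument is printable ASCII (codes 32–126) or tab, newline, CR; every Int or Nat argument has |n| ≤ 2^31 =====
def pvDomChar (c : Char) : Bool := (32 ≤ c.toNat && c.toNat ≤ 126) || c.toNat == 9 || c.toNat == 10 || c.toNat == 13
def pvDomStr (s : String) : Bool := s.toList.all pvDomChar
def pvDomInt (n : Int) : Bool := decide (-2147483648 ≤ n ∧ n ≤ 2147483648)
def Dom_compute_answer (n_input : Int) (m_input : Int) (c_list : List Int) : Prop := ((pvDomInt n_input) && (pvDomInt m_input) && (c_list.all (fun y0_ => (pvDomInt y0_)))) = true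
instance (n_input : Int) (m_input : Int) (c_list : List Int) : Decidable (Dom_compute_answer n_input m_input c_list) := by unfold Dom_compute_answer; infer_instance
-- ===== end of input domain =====

-- B replaces A's bottom-up length-indexed DP table by a top-down memoized
-- recursion over intervals (same preprocessing and recurrence); objective: alternative.

-- ===== PORT A =====
def pvMOD : Int := 998244353

-- shared preprocessing helper (this loop is verbatim identical in Source A and Source B):
-- 'for i in range(new_n): c = C2[i]; if c >= m_code or c < 0: return 0; pos[c].append(i)'
def pvBuildPos (C2 : List Int) (m_code : Int) : List Int → List (List Int) → Option (List (List Int))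
  | [], pos => some pos
  | i :: rest, pos =>
    let c := PySem.List.pyGetD C2 i 0
    if m_code ≤ c ∨ c < 0 then none
    else pvBuildPos C2 m_code rest
      (PySem.List.pySetD pos c (PySem.List.pyGetD pos c [] ++ [i]))

-- DP[i][j] reads/writes (indices are provably in range wherever these are used)
def pvGet2 (DP : List (List Int)) (i j : Int) : Int :=
  PySem.List.pyGetD (PySem.List.pyGetD DP i []) j 0

def pvSet2 (DP : List (List Int)) (i j v : Int) : List (List Int) :=
  PySem.List.pySetD DP i (PySem.List.pySetD (PySem.List.pyGetD DP i []) j v)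

-- body of A's doubly-nested DP loop for one cell (i, j)
def pvCellA (C2 : List Int) (pos : List (List Int)) (DP : List (List Int)) (i j : Int) : List (List Int) :=
  let min_color := (PySem.List.min? (PySem.List.slice C2 (some i) (some j)) (fun x => x)).getD 0
  let min_indices := (PySem.List.pyRange i j 1).filter (fun p => PySem.List.pyGetD C2 p 0 == min_color)
  if min_indices = [] then pvSet2 DP i j 0
  else
    let first := (PySem.List.min? min_indices (fun x => x)).getD 0
    let last := (PySem.List.max? min_indices (fun x => x)).getD 0
    let left := (PySem.List.pyRange i (first + 1) 1).foldl
      (fun left k => PySem.Int.mod (left + pvGet2 DP i k * pvGet2 DP k first) pvMOD) 0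
    let right := (PySem.List.pyRange (last + 1) (j + 1) 1).foldl
      (fun right k => PySem.Int.mod (right + pvGet2 DP (last + 1) k * pvGet2 DP k j) pvMOD) 0
    let cp := PySem.List.pyGetD pos min_color []
    let middle := (PySem.List.pyRange 0 (PySem.List.len cp - 1) 1).foldl
      (fun middle idx =>
        let prev := PySem.List.pyGetD cp idx 0
        let next_p := PySem.List.pyGetD cp (idx + 1) 0
        if prev < i ∨ next_p ≥ j then middle
        else PySem.Int.mod (middle * pvGet2 DP (prev + 1) next_p) pvMOD) 1
    pvSet2 DP i j (PySem.Int.mod (PySem.Int.mod (left * right) pvMOD * middle) pvMOD)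

def compute_answer (n_input : Int) (m_input : Int) (c_list : List Int) : Int :=
  let m_code := n_input
  let C := c_list.map (fun x => x - 1)
  match C with
  | [] => 0
  | c0 :: crest =>
    let C2 := crest.foldl (fun acc c => if PySem.List.pyGetD acc (-1) 0 ≠ c then acc ++ [c] else acc) [c0]
    let new_n := PySem.List.len C2
    if new_n > 2 * m_code then 0
    else
      match pvBuildPos C2 m_code (PySem.List.pyRange 0 new_n 1) ((PySem.List.pyRange 0 m_code 1).map (fun _ => [])) with
      | none => 0
      | some pos =>
        if (PySem.List.pyRange 0 m_code 1).all (fun color => !(PySem.List.pyGetD pos color []).isEmpty) then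
          let DP0 := (PySem.List.pyRange 0 (new_n + 1) 1).map (fun _ => PySem.List.pyRepeat [(1 : Int)] (new_n + 1))
          let DPf := (PySem.List.pyRange 1 (new_n + 1) 1).foldl (fun DP le =>
            (PySem.List.pyRange 0 (new_n - le + 1) 1).foldl (fun DP i => pvCellA C2 pos DP i (i + le)) DP) DP0
          pvGet2 DPf 0 new_n
        else 0

-- ===== PORT B =====
-- Source B's memoized f(i, j); the memo dict is threaded through, fuel only makes the
-- recursion structural (fuel ≥ j - i at every reachable call, so the 0-guard never fires)
def pvF (C2 : List Int) (pos : List (List Int)) : Nat → PySem.Dict (Int × Int) Int → Int → Int → Int × PySem.Dict (Int × Int) Int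
  | fuel, memo, i, j =>
    if j - i ≤ 0 then (1, memo)
    else
      match fuel with
      | 0 => (1, memo)
      | Nat.succ f =>
        match memo.get? (i, j) with
        | some v => (v, memo)
        | none =>
          let min_color := (PySem.List.min? (PySem.List.slice C2 (some i) (some j)) (fun x => x)).getD 0
          let min_indices := (PySem.List.pyRange i j 1).filter (fun p => PySem.List.pyGetD C2 p 0 == min_color)
          let first := (PySem.List.min? min_indices (fun x => x)).getD 0
          let last := (PySem.List.max? min_indices (fun x => x)).getD 0
          let lr := (PySem.List.pyRange i (first + 1) 1).foldl
            (fun s k =>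
              let r1 := pvF C2 pos f s.2 i k
              let r2 := pvF C2 pos f r1.2 k first
              (PySem.Int.mod (s.1 + r1.1 * r2.1) pvMOD, r2.2)) (0, memo)
          let rr := (PySem.List.pyRange (last + 1) (j + 1) 1).foldl
            (fun s k =>
              let r1 := pvF C2 pos f s.2 (last + 1) k
              let r2 := pvF C2 pos f r1.2 k j
              (PySem.Int.mod (s.1 + r1.1 * r2.1) pvMOD, r2.2)) (0, lr.2)
          let cp := PySem.List.pyGetD pos min_color []
          let mr := (PySem.List.pyRange 0 (PySem.List.len cp - 1) 1).foldl
            (fun s idx =>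
              let prev := PySem.List.pyGetD cp idx 0
              let next_p := PySem.List.pyGetD cp (idx + 1) 0
              if prev < i ∨ next_p ≥ j then s
              else
                let r := pvF C2 pos f s.2 (prev + 1) next_p
                (PySem.Int.mod (s.1 * r.1) pvMOD, r.2)) (1, rr.2)
          let res := PySem.Int.mod (PySem.Int.mod (lr.1 * rr.1) pvMOD * mr.1) pvMOD
          (res, mr.2.insert (i, j) res)

def compute_answer_alt (n_input : Int) (m_input : Int) (c_list : List Int) : Int :=
  let m_code := n_input
  let C := c_list.map (fun x => x - 1)
  match C with
  | [] => 0
  | c0 :: crest =>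
    let C2 := crest.foldl (fun acc c => if PySem.List.pyGetD acc (-1) 0 ≠ c then acc ++ [c] else acc) [c0]
    let new_n := PySem.List.len C2
    if new_n > 2 * m_code then 0
    else
      match pvBuildPos C2 m_code (PySem.List.pyRange 0 new_n 1) ((PySem.List.pyRange 0 m_code 1).map (fun _ => [])) with
      | none => 0
      | some pos =>
        if (PySem.List.pyRange 0 m_code 1).all (fun color => !(PySem.List.pyGetD pos color []).isEmpty) then
          (pvF C2 pos new_n.toNat PySem.Dict.empty 0 new_n).1
        else 0

-- ===== PRECONDITION & SPEC =====
def Spec_compute_answer (n_input : Int) (m_input : Int) (c_list : List Int) (out : Int) : Prop := out = compute_answer_alt n_input m_input c_list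
instance (n_input : Int) (m_input : Int) (c_list : List Int) (out : Int) : Decidable (Spec_compute_answer n_input m_input c_list out) := by unfold Spec_compute_answer; infer_instance

-- ===== CLAIM (what is proved, stated in full; the proofs are below) =====
def Claim_equal_compute_answer : Prop := ∀ (n_input : Int) (m_input : Int) (c_list : List Int), Dom_compute_answer n_input m_input c_list → Spec_compute_answer n_input m_input c_list (compute_answer n_input m_input c_list)

-- ===== LEMMAS AND PROOFS =====

-- named pieces of the shared recurrence body
def pvMinColor (C2 : List Int) (i j : Int) : Int :=
  (PySem.List.min? (PySem.List.slice C2 (some i) (some j)) (fun x => x)).getD 0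

def pvMinIndices (C2 : List Int) (i j : Int) : List Int :=
  (PySem.List.pyRange i j 1).filter (fun p => PySem.List.pyGetD C2 p 0 == pvMinColor C2 i j)

def pvFirst (C2 : List Int) (i j : Int) : Int :=
  (PySem.List.min? (pvMinIndices C2 i j) (fun x => x)).getD 0

def pvLast (C2 : List Int) (i j : Int) : Int :=
  (PySem.List.max? (pvMinIndices C2 i j) (fun x => x)).getD 0

def pvLeft (g : Int → Int → Int) (i first : Int) : Int :=
  (PySem.List.pyRange i (first + 1) 1).foldl
    (fun acc k => PySem.Int.mod (acc + g i k * g k first) pvMOD) 0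

def pvRight (g : Int → Int → Int) (last j : Int) : Int :=
  (PySem.List.pyRange (last + 1) (j + 1) 1).foldl
    (fun acc k => PySem.Int.mod (acc + g (last + 1) k * g k j) pvMOD) 0

def pvMid (g : Int → Int → Int) (cp : List Int) (i j : Int) : Int :=
  (PySem.List.pyRange 0 (PySem.List.len cp - 1) 1).foldl
    (fun acc idx =>
      let prev := PySem.List.pyGetD cp idx 0
      let next_p := PySem.List.pyGetD cp (idx + 1) 0
      if prev < i ∨ next_p ≥ j then acc
      else PySem.Int.mod (acc * g (prev + 1) next_p) pvMOD) 1

-- the body of the shared recurrence, abstracted over the recursive call g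
def pvBody (C2 : List Int) (pos : List (List Int)) (g : Int → Int → Int) (i j : Int) : Int :=
  PySem.Int.mod (PySem.Int.mod (pvLeft g i (pvFirst C2 i j) * pvRight g (pvLast C2 i j) j) pvMOD
    * pvMid g (PySem.List.pyGetD pos (pvMinColor C2 i j) []) i j) pvMOD

-- pure (memo-free) version of the recurrence computed by both ports
def pvG (C2 : List Int) (pos : List (List Int)) : Nat → Int → Int → Int
  | 0, _, _ => 1
  | Nat.succ f, i, j => if j - i ≤ 0 then 1 else pvBody C2 pos (pvG C2 pos f) i j

theorem pvG_base (C2 : List Int) (pos : List (List Int)) (fuel : Nat) (i j : Int) (h : j - i ≤ 0) : pvG C2 pos fuel i j = 1 := by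
  cases fuel <;> simp [pvG, h]

theorem pvG_succ (C2 : List Int) (pos : List (List Int)) (f : Nat) (i j : Int) (h : ¬ (j - i ≤ 0)) :
    pvG C2 pos (Nat.succ f) i j = pvBody C2 pos (pvG C2 pos f) i j := by
  simp [pvG, h]

-- an element of a slice is hit by some in-range index
theorem pv_mem_slice_exists (xs : List Int) (i j m : Int) (hi : 0 ≤ i) (hij : i < j)
    (hm : m ∈ PySem.List.slice xs (some i) (some j)) :
    ∃ p : Int, i ≤ p ∧ p < j ∧ PySem.List.pyGetD xs p 0 = m := by
  rw [PySem.List.slice_toNat xs hi (by omega : (0:Int) ≤ j)] at hm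
  obtain ⟨k, hk, hkm⟩ := List.mem_iff_getElem.1 hm
  have hk1 : k < xs.length - i.toNat := by
    have := hk; simp [List.length_take, List.length_drop] at this; omega
  have hk2 : k < j.toNat - i.toNat := by
    have := hk; simp [List.length_take, List.length_drop] at this; omega
  refine ⟨i + k, by omega, by omega, ?_⟩
  rw [PySem.List.pyGetD_eq_getElem xs 0 (by omega) (by omega)]
  rw [List.getElem_take, List.getElem_drop] at hkm
  rw [← hkm]
  congr 1
  omega

-- the min_indices list of a nonempty in-range window is nonempty
theorem pv_min_indices_ne_nil (C2 : List Int) (i j : Int) (hi : 0 ≤ i) (hij : i < j) (hj : j ≤ PySem.List.len C2) :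
    pvMinIndices C2 i j ≠ [] := by
  unfold pvMinIndices pvMinColor
  have hne : PySem.List.slice C2 (some i) (some j) ≠ [] := by
    rw [PySem.List.slice_toNat C2 hi (by omega : (0:Int) ≤ j)]
    intro h
    have := congrArg List.length h
    simp [List.length_take, List.length_drop] at this
    simp [PySem.List.len_eq] at hj
    omega
  obtain ⟨m, hm⟩ : ∃ m, PySem.List.min? (PySem.List.slice C2 (some i) (some j)) (fun x => x) = some m := by
    cases h : PySem.List.min? (PySem.List.slice C2 (some i) (some j)) (fun x => x) with
    | none => exact absurd ((PySem.List.min?_eq_none_iff _ _).1 h) hne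
    | some m => exact ⟨m, rfl⟩
  have hmem : m ∈ PySem.List.slice C2 (some i) (some j) := PySem.List.min?_mem hm
  obtain ⟨p, hp1, hp2, hp3⟩ := pv_mem_slice_exists C2 i j m hi hij hmem
  intro hfil
  have hpmem : p ∈ (PySem.List.pyRange i j 1).filter
      (fun p => PySem.List.pyGetD C2 p 0 == (PySem.List.min? (PySem.List.slice C2 (some i) (some j)) (fun x => x)).getD 0) := by
    rw [List.mem_filter]
    refine ⟨PySem.List.mem_pyRange_one.2 ⟨hp1, hp2⟩, ?_⟩
    rw [hm]
    simp [hp3]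
  rw [hfil] at hpmem
  simp at hpmem

theorem pv_firstlast_facts (C2 : List Int) (i j : Int) (hi : 0 ≤ i) (hij : i < j) (hj : j ≤ PySem.List.len C2) :
    i ≤ pvFirst C2 i j ∧ pvFirst C2 i j < j ∧ i ≤ pvLast C2 i j ∧ pvLast C2 i j < j := by
  have hne := pv_min_indices_ne_nil C2 i j hi hij hj
  obtain ⟨fm, hfm⟩ : ∃ m, PySem.List.min? (pvMinIndices C2 i j) (fun x => x) = some m := by
    cases h : PySem.List.min? (pvMinIndices C2 i j) (fun x => x) with
    | none => exact absurd ((PySem.List.min?_eq_none_iff _ _).1 h) hne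
    | some m => exact ⟨m, rfl⟩
  obtain ⟨lm, hlm⟩ : ∃ m, PySem.List.max? (pvMinIndices C2 i j) (fun x => x) = some m := by
    cases h : PySem.List.max? (pvMinIndices C2 i j) (fun x => x) with
    | none => exact absurd ((PySem.List.max?_eq_none_iff _ _).1 h) hne
    | some m => exact ⟨m, rfl⟩
  have h1 : fm ∈ pvMinIndices C2 i j := PySem.List.min?_mem hfm
  have h2 : lm ∈ pvMinIndices C2 i j := PySem.List.max?_mem hlm
  rw [pvMinIndices, List.mem_filter] at h1 h2
  have hb1 := PySem.List.mem_pyRange_one.1 h1.1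
  have hb2 := PySem.List.mem_pyRange_one.1 h2.1
  rw [pvFirst, pvLast, hfm, hlm]
  simp only [Option.getD_some]
  exact ⟨hb1.1, hb1.2, hb2.1, hb2.2⟩

theorem pv_cp_bounds {L : Int} (pos : List (List Int)) (hpos : ∀ r ∈ pos, ∀ e ∈ r, 0 ≤ e ∧ e < L) (c : Int) :
    ∀ e ∈ PySem.List.pyGetD pos c [], 0 ≤ e ∧ e < L := by
  by_cases h : PySem.Raise.InRange pos.length c
  · exact fun e he => hpos _ (PySem.List.pyGetD_mem pos [] h) e he
  · rw [PySem.List.pyGetD_of_none _ _ _ ((PySem.List.pyGet?_eq_none_iff _ _).2 h)]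
    simp

theorem pvLeft_congr (g g' : Int → Int → Int) (i first : Int)
    (H : ∀ k, i ≤ k → k ≤ first → g i k = g' i k ∧ g k first = g' k first) :
    pvLeft g i first = pvLeft g' i first := by
  unfold pvLeft
  refine PySem.List.foldl_congr_mem _ _ _ _ ?_
  intro acc k hk
  have hb := PySem.List.mem_pyRange_one.1 hk
  obtain ⟨e1, e2⟩ := H k hb.1 (by omega)
  rw [e1, e2]

theorem pvRight_congr (g g' : Int → Int → Int) (last j : Int)
    (H : ∀ k, last + 1 ≤ k → k ≤ j → g (last + 1) k = g' (last + 1) k ∧ g k j = g' k j) :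
    pvRight g last j = pvRight g' last j := by
  unfold pvRight
  refine PySem.List.foldl_congr_mem _ _ _ _ ?_
  intro acc k hk
  have hb := PySem.List.mem_pyRange_one.1 hk
  obtain ⟨e1, e2⟩ := H k hb.1 (by omega)
  rw [e1, e2]

theorem pvMid_congr (g g' : Int → Int → Int) (cp : List Int) (i j : Int)
    (H : ∀ p q, p ∈ cp → q ∈ cp → ¬ (p < i) → ¬ (q ≥ j) → g (p + 1) q = g' (p + 1) q) :
    pvMid g cp i j = pvMid g' cp i j := by
  unfold pvMid
  refine PySem.List.foldl_congr_mem _ _ _ _ ?_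
  intro acc idx hidx
  have hb := PySem.List.mem_pyRange_one.1 hidx
  simp only [PySem.List.len_eq] at hb
  have hprev : PySem.List.pyGetD cp idx 0 ∈ cp :=
    PySem.List.pyGetD_mem cp 0 (by constructor <;> omega)
  have hnext : PySem.List.pyGetD cp (idx + 1) 0 ∈ cp :=
    PySem.List.pyGetD_mem cp 0 (by constructor <;> omega)
  by_cases hc : PySem.List.pyGetD cp idx 0 < i ∨ PySem.List.pyGetD cp (idx + 1) 0 ≥ j
  · simp only [hc, if_pos]
  · simp only [if_neg hc]
    rw [H _ _ hprev hnext (fun h => hc (Or.inl h)) (fun h => hc (Or.inr h))]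

theorem pvBody_congr (C2 : List Int) (pos : List (List Int)) (g g' : Int → Int → Int) (i j : Int)
    (hi : 0 ≤ i) (hij : i < j) (hj : j ≤ PySem.List.len C2)
    (hpos : ∀ r ∈ pos, ∀ e ∈ r, 0 ≤ e ∧ e < PySem.List.len C2)
    (Hg : ∀ x y, 0 ≤ x → x ≤ PySem.List.len C2 → 0 ≤ y → y ≤ PySem.List.len C2 → y - x < j - i → g x y = g' x y) :
    pvBody C2 pos g i j = pvBody C2 pos g' i j := by
  obtain ⟨hf1, hf2, hl1, hl2⟩ := pv_firstlast_facts C2 i j hi hij hj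
  have hcp := pv_cp_bounds pos hpos (pvMinColor C2 i j)
  unfold pvBody
  rw [pvLeft_congr g g' i (pvFirst C2 i j) ?_, pvRight_congr g g' (pvLast C2 i j) j ?_,
      pvMid_congr g g' (PySem.List.pyGetD pos (pvMinColor C2 i j) []) i j ?_]
  · intro p q hp hq hpi hqj
    obtain ⟨hp1, hp2⟩ := hcp p hp
    obtain ⟨hq1, hq2⟩ := hcp q hq
    exact Hg _ _ (by omega) (by omega) (by omega) (by omega) (by omega)
  · intro k hk1 hk2
    constructor
    · exact Hg _ _ (by omega) (by omega) (by omega) (by omega) (by omega)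
    · exact Hg _ _ (by omega) (by omega) (by omega) (by omega) (by omega)
  · intro k hk1 hk2
    constructor
    · exact Hg _ _ (by omega) (by omega) (by omega) (by omega) (by omega)
    · exact Hg _ _ (by omega) (by omega) (by omega) (by omega) (by omega)

theorem pvG_eq_fuel (C2 : List Int) (pos : List (List Int))
    (hpos : ∀ r ∈ pos, ∀ e ∈ r, 0 ≤ e ∧ e < PySem.List.len C2) :
    ∀ (t fuel fuel' : Nat) (i j : Int), 0 ≤ i → j ≤ PySem.List.len C2 →
    (j - i).toNat ≤ t → (j - i).toNat ≤ fuel → (j - i).toNat ≤ fuel' →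
    pvG C2 pos fuel i j = pvG C2 pos fuel' i j := by
  intro t
  induction t with
  | zero =>
    intro fuel fuel' i j hi hj ht _ _
    rw [pvG_base _ _ _ _ _ (by omega), pvG_base _ _ _ _ _ (by omega)]
  | succ t ih =>
    intro fuel fuel' i j hi hj ht hf hf'
    by_cases hij : j - i ≤ 0
    · rw [pvG_base _ _ _ _ _ hij, pvG_base _ _ _ _ _ hij]
    · obtain ⟨f, rfl⟩ : ∃ f, fuel = Nat.succ f := ⟨fuel - 1, by omega⟩
      obtain ⟨f', rfl⟩ : ∃ f', fuel' = Nat.succ f' := ⟨fuel' - 1, by omega⟩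
      rw [pvG_succ _ _ _ _ _ hij, pvG_succ _ _ _ _ _ hij]
      refine pvBody_congr C2 pos _ _ i j (by omega) (by omega) hj hpos ?_
      intro x y hx hx2 hy hy2 hlt
      by_cases hxy : y - x ≤ 0
      · rw [pvG_base _ _ _ _ _ hxy, pvG_base _ _ _ _ _ hxy]
      · exact ih f f' x y hx hy2 (by omega) (by omega) (by omega)


-- ===== B-side: the threaded memo only caches values of pvG =====
def pvMemoInv (C2 : List Int) (pos : List (List Int)) (m : PySem.Dict (Int × Int) Int) : Prop :=
  ∀ x y v, m.get? (x, y) = some v → v = pvG C2 pos (y - x).toNat x y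

theorem pvF_base (C2 : List Int) (pos : List (List Int)) (fuel : Nat) (m : PySem.Dict (Int × Int) Int)
    (i j : Int) (h : j - i ≤ 0) : pvF C2 pos fuel m i j = (1, m) := by
  rw [pvF.eq_def]
  simp [h]

theorem pvF_loopLR (C2 : List Int) (pos : List (List Int)) (f : Nat) (P : Int → Int → Prop)
    (H : ∀ m x y, pvMemoInv C2 pos m → P x y →
      (pvF C2 pos f m x y).1 = pvG C2 pos f x y ∧ pvMemoInv C2 pos (pvF C2 pos f m x y).2)
    (a b : Int) :
    ∀ (l : List Int) (acc : Int) (m : PySem.Dict (Int × Int) Int),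
      (∀ k ∈ l, P a k ∧ P k b) → pvMemoInv C2 pos m →
      ∃ m', (l.foldl (fun s k =>
          let r1 := pvF C2 pos f s.2 a k
          let r2 := pvF C2 pos f r1.2 k b
          (PySem.Int.mod (s.1 + r1.1 * r2.1) pvMOD, r2.2)) (acc, m)) =
        (l.foldl (fun acc k => PySem.Int.mod (acc + pvG C2 pos f a k * pvG C2 pos f k b) pvMOD) acc, m') ∧
        pvMemoInv C2 pos m' := by
  intro l
  induction l with
  | nil => exact fun acc m _ hm => ⟨m, rfl, hm⟩
  | cons k t ih =>
    intro acc m hmem hm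
    obtain ⟨hPa, hPb⟩ := hmem k List.mem_cons_self
    obtain ⟨e1, h1⟩ := H m a k hm hPa
    obtain ⟨e2, h2⟩ := H _ k b h1 hPb
    simp only [List.foldl_cons, e1, e2]
    exact ih _ _ (fun x hx => hmem x (List.mem_cons_of_mem _ hx)) h2

theorem pvF_loopMid (C2 : List Int) (pos : List (List Int)) (f : Nat) (P : Int → Int → Prop)
    (H : ∀ m x y, pvMemoInv C2 pos m → P x y →
      (pvF C2 pos f m x y).1 = pvG C2 pos f x y ∧ pvMemoInv C2 pos (pvF C2 pos f m x y).2)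
    (cp : List Int) (i j : Int)
    (Hcp : ∀ p q, p ∈ cp → q ∈ cp → ¬ (p < i) → ¬ (q ≥ j) → P (p + 1) q) :
    ∀ (l : List Int) (acc : Int) (m : PySem.Dict (Int × Int) Int),
      (∀ idx ∈ l, 0 ≤ idx ∧ idx + 1 < PySem.List.len cp) → pvMemoInv C2 pos m →
      ∃ m', (l.foldl (fun s idx =>
          let prev := PySem.List.pyGetD cp idx 0
          let next_p := PySem.List.pyGetD cp (idx + 1) 0
          if prev < i ∨ next_p ≥ j then s
          else
            let r := pvF C2 pos f s.2 (prev + 1) next_p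
            (PySem.Int.mod (s.1 * r.1) pvMOD, r.2)) (acc, m)) =
        (l.foldl (fun acc idx =>
          let prev := PySem.List.pyGetD cp idx 0
          let next_p := PySem.List.pyGetD cp (idx + 1) 0
          if prev < i ∨ next_p ≥ j then acc
          else PySem.Int.mod (acc * pvG C2 pos f (prev + 1) next_p) pvMOD) acc, m') ∧
        pvMemoInv C2 pos m' := by
  intro l
  induction l with
  | nil => exact fun acc m _ hm => ⟨m, rfl, hm⟩
  | cons idx t ih =>
    intro acc m hmem hm
    obtain ⟨hi0, hi1⟩ := hmem idx List.mem_cons_self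
    simp only [PySem.List.len_eq] at hi1
    simp only [List.foldl_cons]
    by_cases hc : PySem.List.pyGetD cp idx 0 < i ∨ PySem.List.pyGetD cp (idx + 1) 0 ≥ j
    · simp only [hc, if_pos]
      exact ih _ _ (fun x hx => hmem x (List.mem_cons_of_mem _ hx)) hm
    · simp only [if_neg hc]
      have hprev : PySem.List.pyGetD cp idx 0 ∈ cp :=
        PySem.List.pyGetD_mem cp 0 (by constructor <;> omega)
      have hnext : PySem.List.pyGetD cp (idx + 1) 0 ∈ cp :=
        PySem.List.pyGetD_mem cp 0 (by constructor <;> omega)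
      obtain ⟨e1, h1⟩ := H m _ _ hm
        (Hcp _ _ hprev hnext (fun h => hc (Or.inl h)) (fun h => hc (Or.inr h)))
      simp only [e1]
      exact ih _ _ (fun x hx => hmem x (List.mem_cons_of_mem _ hx)) h1

theorem pvF_hit (C2 : List Int) (pos : List (List Int)) (f : Nat) (m : PySem.Dict (Int × Int) Int)
    (i j v : Int) (hij : ¬ (j - i ≤ 0)) (hget : m.get? (i, j) = some v) :
    pvF C2 pos (Nat.succ f) m i j = (v, m) := by
  rw [pvF.eq_def]
  simp only [if_neg hij, hget]

theorem pvF_miss (C2 : List Int) (pos : List (List Int)) (f : Nat) (m : PySem.Dict (Int × Int) Int)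
    (i j : Int) (hij : ¬ (j - i ≤ 0)) (hget : m.get? (i, j) = none) :
    pvF C2 pos (Nat.succ f) m i j =
      (let lr := (PySem.List.pyRange i (pvFirst C2 i j + 1) 1).foldl
          (fun s k =>
            let r1 := pvF C2 pos f s.2 i k
            let r2 := pvF C2 pos f r1.2 k (pvFirst C2 i j)
            (PySem.Int.mod (s.1 + r1.1 * r2.1) pvMOD, r2.2)) (0, m)
       let rr := (PySem.List.pyRange (pvLast C2 i j + 1) (j + 1) 1).foldl
          (fun s k =>
            let r1 := pvF C2 pos f s.2 (pvLast C2 i j + 1) k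
            let r2 := pvF C2 pos f r1.2 k j
            (PySem.Int.mod (s.1 + r1.1 * r2.1) pvMOD, r2.2)) (0, lr.2)
       let cp := PySem.List.pyGetD pos (pvMinColor C2 i j) []
       let mr := (PySem.List.pyRange 0 (PySem.List.len cp - 1) 1).foldl
          (fun s idx =>
            let prev := PySem.List.pyGetD cp idx 0
            let next_p := PySem.List.pyGetD cp (idx + 1) 0
            if prev < i ∨ next_p ≥ j then s
            else
              let r := pvF C2 pos f s.2 (prev + 1) next_p
              (PySem.Int.mod (s.1 * r.1) pvMOD, r.2)) (1, rr.2)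
       let res := PySem.Int.mod (PySem.Int.mod (lr.1 * rr.1) pvMOD * mr.1) pvMOD
       (res, mr.2.insert (i, j) res)) := by
  rw [pvF.eq_def]
  simp only [if_neg hij, hget]
  rfl

theorem pvF_spec (C2 : List Int) (pos : List (List Int))
    (hpos : ∀ r ∈ pos, ∀ e ∈ r, 0 ≤ e ∧ e < PySem.List.len C2) :
    ∀ (fuel : Nat) (m : PySem.Dict (Int × Int) Int) (i j : Int),
      0 ≤ i → j ≤ PySem.List.len C2 → (j - i).toNat ≤ fuel → pvMemoInv C2 pos m →
      (pvF C2 pos fuel m i j).1 = pvG C2 pos fuel i j ∧ pvMemoInv C2 pos (pvF C2 pos fuel m i j).2 := by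
  intro fuel
  induction fuel with
  | zero =>
    intro m i j hi hj ht hm
    rw [pvF_base _ _ _ _ _ _ (by omega), pvG_base _ _ _ _ _ (by omega)]
    exact ⟨rfl, hm⟩
  | succ f ih =>
    intro m i j hi hj ht hm
    by_cases hij : j - i ≤ 0
    · rw [pvF_base _ _ _ _ _ _ hij, pvG_base _ _ _ _ _ hij]
      exact ⟨rfl, hm⟩
    · obtain ⟨hf1, hf2, hl1, hl2⟩ := pv_firstlast_facts C2 i j hi (by omega) hj
      cases hget : PySem.Dict.get? m (i, j) with
      | some v =>
        rw [pvF_hit C2 pos f m i j v hij hget]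
        refine ⟨?_, hm⟩
        have := hm i j v hget
        rw [this]
        exact pvG_eq_fuel C2 pos hpos (j - i).toNat (j - i).toNat (Nat.succ f) i j hi hj le_rfl le_rfl ht
      | none =>
        rw [pvF_miss C2 pos f m i j hij hget]
        simp only []
        obtain ⟨m1, e1, h1⟩ := pvF_loopLR C2 pos f
          (fun x y => 0 ≤ x ∧ x ≤ PySem.List.len C2 ∧ 0 ≤ y ∧ y ≤ PySem.List.len C2 ∧ (y - x).toNat ≤ f)
          (fun mm x y hmm hP => ih mm x y hP.1 hP.2.2.2.1 hP.2.2.2.2 hmm)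
          i (pvFirst C2 i j)
          (PySem.List.pyRange i (pvFirst C2 i j + 1) 1) 0 m
          (by
            intro k hk
            have hb := PySem.List.mem_pyRange_one.1 hk
            exact ⟨⟨by omega, by omega, by omega, by omega, by omega⟩,
                   ⟨by omega, by omega, by omega, by omega, by omega⟩⟩)
          hm
        rw [e1]
        obtain ⟨m2, e2, h2⟩ := pvF_loopLR C2 pos f
          (fun x y => 0 ≤ x ∧ x ≤ PySem.List.len C2 ∧ 0 ≤ y ∧ y ≤ PySem.List.len C2 ∧ (y - x).toNat ≤ f)
          (fun mm x y hmm hP => ih mm x y hP.1 hP.2.2.2.1 hP.2.2.2.2 hmm)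
          (pvLast C2 i j + 1) j
          (PySem.List.pyRange (pvLast C2 i j + 1) (j + 1) 1) 0 m1
          (by
            intro k hk
            have hb := PySem.List.mem_pyRange_one.1 hk
            exact ⟨⟨by omega, by omega, by omega, by omega, by omega⟩,
                   ⟨by omega, by omega, by omega, by omega, by omega⟩⟩)
          h1
        rw [e2]
        obtain ⟨m3, e3, h3⟩ := pvF_loopMid C2 pos f
          (fun x y => 0 ≤ x ∧ x ≤ PySem.List.len C2 ∧ 0 ≤ y ∧ y ≤ PySem.List.len C2 ∧ (y - x).toNat ≤ f)
          (fun mm x y hmm hP => ih mm x y hP.1 hP.2.2.2.1 hP.2.2.2.2 hmm)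
          (PySem.List.pyGetD pos (pvMinColor C2 i j) []) i j
          (by
            intro p q hp hq hpi hqj
            obtain ⟨hp1, hp2⟩ := pv_cp_bounds pos hpos (pvMinColor C2 i j) p hp
            obtain ⟨hq1, hq2⟩ := pv_cp_bounds pos hpos (pvMinColor C2 i j) q hq
            exact ⟨by omega, by omega, by omega, by omega, by omega⟩)
          (PySem.List.pyRange 0 (PySem.List.len (PySem.List.pyGetD pos (pvMinColor C2 i j) []) - 1) 1)
          1 m2
          (by
            intro idx hidx
            have hb := PySem.List.mem_pyRange_one.1 hidx
            exact ⟨by omega, by omega⟩)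
          h2
        rw [e3]
        constructor
        · rw [pvG_succ _ _ _ _ _ hij]
          unfold pvBody pvLeft pvRight pvMid
          rfl
        · intro x y v hv
          rw [PySem.Dict.get?_insert] at hv
          by_cases hxy : (x, y) = (i, j)
          · rw [if_pos hxy] at hv
            have hx : x = i := congrArg Prod.fst hxy
            have hy : y = j := congrArg Prod.snd hxy
            rw [hx, hy, ← Option.some_inj.1 hv,
              ← pvG_eq_fuel C2 pos hpos (j - i).toNat (Nat.succ f) (j - i).toNat i j hi hj le_rfl ht le_rfl,
              pvG_succ _ _ _ _ _ hij]
            unfold pvBody pvLeft pvRight pvMid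
            rfl
          · rw [if_neg hxy] at hv
            exact h3 x y v hv


-- ===== A-side: the DP table stores values of pvG =====
def pvShape (DP : List (List Int)) (N : Nat) : Prop :=
  DP.length = N + 1 ∧ ∀ r ∈ DP, r.length = N + 1

-- cells (x, y) with y - x "done" hold pvG, the rest still hold the initial 1
def pvInv2 (C2 : List Int) (pos : List (List Int)) (DP : List (List Int)) (le idone : Int) : Prop :=
  ∀ x y : Int, 0 ≤ x → x ≤ PySem.List.len C2 → 0 ≤ y → y ≤ PySem.List.len C2 →
    pvGet2 DP x y = if y - x < le ∨ (y - x = le ∧ x < idone) then pvG C2 pos (y - x).toNat x y else 1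

theorem pvInv2_of_iff (C2 : List Int) (pos : List (List Int)) (DP : List (List Int)) (le idone le' idone' : Int)
    (h : ∀ x y : Int, 0 ≤ x → x ≤ PySem.List.len C2 → 0 ≤ y → y ≤ PySem.List.len C2 →
      ((y - x < le ∨ (y - x = le ∧ x < idone)) ↔ (y - x < le' ∨ (y - x = le' ∧ x < idone'))))
    (hinv : pvInv2 C2 pos DP le idone) : pvInv2 C2 pos DP le' idone' := by
  intro x y hx hx2 hy hy2
  rw [hinv x y hx hx2 hy hy2]
  exact if_congr (h x y hx hx2 hy hy2) rfl rfl

theorem pvShape_set2 (DP : List (List Int)) (N : Nat) (i j v : Int) (hs : pvShape DP N)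
    (hi : 0 ≤ i) (hi2 : i < (N : Int) + 1) : pvShape (pvSet2 DP i j v) N := by
  obtain ⟨h1, h2⟩ := hs
  unfold pvSet2
  rw [PySem.List.pySetD_of_nonneg _ _ hi]
  refine ⟨by simp [h1], ?_⟩
  intro r hr
  rcases List.mem_or_eq_of_mem_set hr with hmem | rfl
  · exact h2 _ hmem
  · rw [PySem.List.length_pySetD]
    have hrow : PySem.List.pyGetD DP i [] ∈ DP :=
      PySem.List.pyGetD_mem DP [] (by constructor <;> omega)
    exact h2 _ hrow

theorem pvGet2_set2 (DP : List (List Int)) (N : Nat) (i j x y v : Int) (hs : pvShape DP N)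
    (hi : 0 ≤ i) (hi2 : i ≤ (N : Int)) (hj : 0 ≤ j) (_hj2 : j ≤ (N : Int))
    (hx : 0 ≤ x) (hx2 : x ≤ (N : Int)) (hy : 0 ≤ y) (hy2 : y ≤ (N : Int)) :
    pvGet2 (pvSet2 DP i j v) x y = if x = i ∧ y = j then v else pvGet2 DP x y := by
  obtain ⟨h1, h2⟩ := hs
  have hrow : PySem.List.pyGetD DP i [] = DP[i.toNat]'(by omega) :=
    PySem.List.pyGetD_eq_getElem DP [] hi (by omega)
  have hrowlen : (DP[i.toNat]'(by omega)).length = N + 1 := h2 _ (List.getElem_mem (by omega))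
  have hxrow : PySem.List.pyGetD DP x [] = DP[x.toNat]'(by omega) :=
    PySem.List.pyGetD_eq_getElem DP [] hx (by omega)
  have hxrowlen : (DP[x.toNat]'(by omega)).length = N + 1 := h2 _ (List.getElem_mem (by omega))
  unfold pvSet2 pvGet2
  rw [PySem.List.pySetD_of_nonneg _ _ hi, PySem.List.pySetD_of_nonneg _ _ hj]
  rw [PySem.List.pyGetD_eq_getElem _ [] hx (by simp [h1]; omega)]
  rw [List.getElem_set]
  by_cases hxi : x = i
  · rw [if_pos (by omega : i.toNat = x.toNat), hrow]
    rw [PySem.List.pyGetD_eq_getElem _ 0 hy (by rw [List.length_set, hrowlen]; omega)]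
    rw [List.getElem_set]
    by_cases hyj : y = j
    · rw [if_pos (by omega : j.toNat = y.toNat), if_pos ⟨hxi, hyj⟩]
    · rw [if_neg (by omega : ¬ j.toNat = y.toNat), if_neg (fun h => hyj h.2)]
      rw [hxrow, PySem.List.pyGetD_eq_getElem _ 0 hy (by rw [hxrowlen]; omega)]
      simp only [show x.toNat = i.toNat from by omega]
  · rw [if_neg (by omega : ¬ i.toNat = x.toNat), if_neg (fun h => hxi h.1), hxrow]


theorem pvCellA_eq (C2 : List Int) (pos : List (List Int)) (DP : List (List Int)) (i j : Int)
    (hne : pvMinIndices C2 i j ≠ []) :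
    pvCellA C2 pos DP i j = pvSet2 DP i j (pvBody C2 pos (fun x y => pvGet2 DP x y) i j) := by
  have hne' : ((PySem.List.pyRange i j 1).filter
      (fun p => PySem.List.pyGetD C2 p 0 == (PySem.List.min? (PySem.List.slice C2 (some i) (some j)) (fun x => x)).getD 0)) ≠ [] := hne
  unfold pvCellA
  rw [if_neg hne']
  rfl

theorem pvCell_step (C2 : List Int) (pos : List (List Int))
    (hpos : ∀ r ∈ pos, ∀ e ∈ r, 0 ≤ e ∧ e < PySem.List.len C2)
    (DP : List (List Int)) (le i : Int)
    (hs : pvShape DP C2.length) (hle : 1 ≤ le) (hi : 0 ≤ i) (hij : i + le ≤ PySem.List.len C2)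
    (hinv : pvInv2 C2 pos DP le i) :
    pvShape (pvCellA C2 pos DP i (i + le)) C2.length ∧
    pvInv2 C2 pos (pvCellA C2 pos DP i (i + le)) le (i + 1) := by
  have hlen : PySem.List.len C2 = (C2.length : Int) := PySem.List.len_eq C2
  have hne := pv_min_indices_ne_nil C2 i (i + le) hi (by omega) (by omega)
  rw [pvCellA_eq C2 pos DP i (i + le) hne]
  have hval : pvBody C2 pos (fun x y => pvGet2 DP x y) i (i + le) = pvG C2 pos le.toNat i (i + le) := by
    obtain ⟨f, hf⟩ : ∃ f, le.toNat = f + 1 := ⟨le.toNat - 1, by omega⟩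
    rw [hf, show ((f : Nat) + 1) = Nat.succ f from rfl, pvG_succ _ _ _ _ _ (by omega)]
    refine pvBody_congr C2 pos _ _ i (i + le) hi (by omega) (by omega) hpos ?_
    intro x y hx hx2 hy hy2 hlt
    rw [hinv x y hx hx2 hy hy2, if_pos (Or.inl (by omega))]
    exact pvG_eq_fuel C2 pos hpos (y - x).toNat (y - x).toNat f x y hx hy2 le_rfl le_rfl (by omega)
  rw [hval]
  refine ⟨pvShape_set2 DP C2.length i (i + le) _ hs hi (by omega), ?_⟩
  intro x y hx hx2 hy hy2
  rw [pvGet2_set2 DP C2.length i (i + le) x y _ hs hi (by omega) (by omega) (by omega)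
      hx (by omega) hy (by omega)]
  by_cases hxy : x = i ∧ y = i + le
  · rw [if_pos hxy, if_pos (Or.inr (by omega))]
    obtain ⟨rfl, rfl⟩ := hxy
    congr 1
    omega
  · rw [if_neg hxy, hinv x y hx hx2 hy hy2]
    refine if_congr ?_ rfl rfl
    constructor
    · rintro (h | h)
      · exact Or.inl h
      · exact Or.inr ⟨h.1, by omega⟩
    · rintro (h | h)
      · exact Or.inl h
      · refine Or.inr ⟨h.1, ?_⟩
        rcases lt_or_eq_of_le (by omega : x ≤ i) with hc | rfl
        · exact hc
        · exact absurd ⟨rfl, by omega⟩ hxy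

theorem pvInner (C2 : List Int) (pos : List (List Int))
    (hpos : ∀ r ∈ pos, ∀ e ∈ r, 0 ≤ e ∧ e < PySem.List.len C2) (le : Int) (hle : 1 ≤ le) :
    ∀ (t : Nat) (x0 : Int) (DP : List (List Int)), 0 ≤ x0 →
      (PySem.List.len C2 - le + 1 - x0).toNat ≤ t →
      pvShape DP C2.length → pvInv2 C2 pos DP le x0 →
      pvShape ((PySem.List.pyRange x0 (PySem.List.len C2 - le + 1) 1).foldl
        (fun DP i => pvCellA C2 pos DP i (i + le)) DP) C2.length ∧
      pvInv2 C2 pos ((PySem.List.pyRange x0 (PySem.List.len C2 - le + 1) 1).foldl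
        (fun DP i => pvCellA C2 pos DP i (i + le)) DP) le (PySem.List.len C2 - le + 1) := by
  intro t
  induction t with
  | zero =>
    intro x0 DP hx0 ht hs hinv
    rw [PySem.List.pyRange_one_eq_nil (by omega)]
    refine ⟨hs, pvInv2_of_iff C2 pos DP le x0 le _ (fun x y hx hx2 hy hy2 => ?_) hinv⟩
    constructor
    · rintro (h | h)
      · exact Or.inl h
      · exact Or.inr ⟨h.1, by omega⟩
    · rintro (h | h)
      · exact Or.inl h
      · exact Or.inr ⟨h.1, by omega⟩
  | succ t ih =>
    intro x0 DP hx0 ht hs hinv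
    by_cases hend : PySem.List.len C2 - le + 1 ≤ x0
    · rw [PySem.List.pyRange_one_eq_nil hend]
      refine ⟨hs, pvInv2_of_iff C2 pos DP le x0 le _ (fun x y hx hx2 hy hy2 => ?_) hinv⟩
      constructor
      · rintro (h | h)
        · exact Or.inl h
        · exact Or.inr ⟨h.1, by omega⟩
      · rintro (h | h)
        · exact Or.inl h
        · exact Or.inr ⟨h.1, by omega⟩
    · rw [PySem.List.pyRange_one_cons (by omega), List.foldl_cons]
      obtain ⟨hs', hinv'⟩ := pvCell_step C2 pos hpos DP le x0 hs hle hx0 (by omega) hinv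
      exact ih (x0 + 1) _ (by omega) (by omega) hs' hinv'

theorem pvOuter (C2 : List Int) (pos : List (List Int))
    (hpos : ∀ r ∈ pos, ∀ e ∈ r, 0 ≤ e ∧ e < PySem.List.len C2) :
    ∀ (t : Nat) (lo : Int) (DP : List (List Int)), 1 ≤ lo →
      (PySem.List.len C2 + 1 - lo).toNat ≤ t →
      pvShape DP C2.length → pvInv2 C2 pos DP lo 0 →
      pvInv2 C2 pos ((PySem.List.pyRange lo (PySem.List.len C2 + 1) 1).foldl (fun DP le =>
        (PySem.List.pyRange 0 (PySem.List.len C2 - le + 1) 1).foldl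
          (fun DP i => pvCellA C2 pos DP i (i + le)) DP) DP) (PySem.List.len C2 + 1) 0 := by
  intro t
  induction t with
  | zero =>
    intro lo DP hlo ht hs hinv
    rw [PySem.List.pyRange_one_eq_nil (by omega)]
    refine pvInv2_of_iff C2 pos DP lo 0 _ 0 (fun x y hx hx2 hy hy2 => ?_) hinv
    omega
  | succ t ih =>
    intro lo DP hlo ht hs hinv
    by_cases hend : PySem.List.len C2 + 1 ≤ lo
    · rw [PySem.List.pyRange_one_eq_nil hend]
      refine pvInv2_of_iff C2 pos DP lo 0 _ 0 (fun x y hx hx2 hy hy2 => ?_) hinv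
      omega
    · rw [PySem.List.pyRange_one_cons (by omega), List.foldl_cons]
      obtain ⟨hs', hinv'⟩ := pvInner C2 pos hpos lo hlo (PySem.List.len C2 - lo + 1 - 0).toNat 0 DP
        le_rfl le_rfl hs (pvInv2_of_iff C2 pos DP lo 0 lo 0 (fun x y hx hx2 hy hy2 => Iff.rfl) hinv)
      refine ih (lo + 1) _ (by omega) (by omega) hs' ?_
      refine pvInv2_of_iff C2 pos _ lo (PySem.List.len C2 - lo + 1) (lo + 1) 0
        (fun x y hx hx2 hy hy2 => ?_) hinv'
      omega


theorem pvDP0_shape (C2 : List Int) :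
    pvShape ((PySem.List.pyRange 0 (PySem.List.len C2 + 1) 1).map
      (fun _ => PySem.List.pyRepeat [(1 : Int)] (PySem.List.len C2 + 1))) C2.length := by
  constructor
  · rw [List.length_map, PySem.List.length_pyRange_one]
    simp [PySem.List.len_eq]
  · intro r hr
    obtain ⟨a, _, rfl⟩ := List.mem_map.1 hr
    rw [PySem.List.pyRepeat_singleton, List.length_replicate]
    simp [PySem.List.len_eq]

theorem pvDP0_one (C2 : List Int) (x y : Int) (hx : 0 ≤ x) (hx2 : x ≤ PySem.List.len C2)
    (hy : 0 ≤ y) (hy2 : y ≤ PySem.List.len C2) :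
    pvGet2 ((PySem.List.pyRange 0 (PySem.List.len C2 + 1) 1).map
      (fun _ => PySem.List.pyRepeat [(1 : Int)] (PySem.List.len C2 + 1))) x y = 1 := by
  unfold pvGet2
  rw [PySem.List.pyGetD_map_pyRange_of_nonneg _ (PySem.List.len C2 + 1) x [] hx (by omega)]
  rw [PySem.List.pyRepeat_singleton]
  rw [PySem.List.pyGetD_eq_getElem _ 0 hy
    (by rw [List.length_replicate]; simp [PySem.List.len_eq] at hx2 hy2 ⊢; omega)]
  exact List.getElem_replicate _

theorem pvDP0_inv (C2 : List Int) (pos : List (List Int)) :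
    pvInv2 C2 pos ((PySem.List.pyRange 0 (PySem.List.len C2 + 1) 1).map
      (fun _ => PySem.List.pyRepeat [(1 : Int)] (PySem.List.len C2 + 1))) 1 0 := by
  intro x y hx hx2 hy hy2
  rw [pvDP0_one C2 x y hx hx2 hy hy2]
  by_cases hc : y - x < 1 ∨ (y - x = 1 ∧ x < 0)
  · rw [if_pos hc, pvG_base _ _ _ _ _ (by omega)]
  · rw [if_neg hc]

-- every element appended by the pos-building loop comes from its index list
theorem pvBuildPos_rows (C2 : List Int) (m_code : Int) (Q : Int → Prop) :
    ∀ (l : List Int) (pos pos' : List (List Int)), pvBuildPos C2 m_code l pos = some pos' →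
      (∀ r ∈ pos, ∀ e ∈ r, Q e) → (∀ e ∈ l, Q e) → ∀ r ∈ pos', ∀ e ∈ r, Q e := by
  intro l
  induction l with
  | nil =>
    intro pos pos' h hpos _
    rw [pvBuildPos] at h
    cases h
    exact hpos
  | cons a t ih =>
    intro pos pos' h hpos hl
    rw [pvBuildPos] at h
    by_cases hc : m_code ≤ PySem.List.pyGetD C2 a 0 ∨ PySem.List.pyGetD C2 a 0 < 0
    · rw [if_pos hc] at h
      cases h
    · rw [if_neg hc] at h
      refine ih _ _ h ?_ (fun e he => hl e (List.mem_cons_of_mem _ he))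
      intro r hr e he
      rw [PySem.List.pySetD_of_nonneg _ _ (by omega)] at hr
      rcases List.mem_or_eq_of_mem_set hr with hmem | rfl
      · exact hpos _ hmem e he
      · rcases List.mem_append.1 he with hmem | hmem
        · by_cases hin : PySem.Raise.InRange pos.length (PySem.List.pyGetD C2 a 0)
          · exact hpos _ (PySem.List.pyGetD_mem pos [] hin) e hmem
          · rw [PySem.List.pyGetD_of_none _ _ _ ((PySem.List.pyGet?_eq_none_iff _ _).2 hin)] at hmem
            cases hmem
        · rw [List.mem_singleton.1 hmem]
          exact hl a List.mem_cons_self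

theorem pv_compress_ne_nil (l acc : List Int) (h : acc ≠ []) :
    l.foldl (fun acc c => if PySem.List.pyGetD acc (-1) 0 ≠ c then acc ++ [c] else acc) acc ≠ [] := by
  induction l generalizing acc with
  | nil => exact h
  | cons c t ih =>
    rw [List.foldl_cons]
    by_cases hc : PySem.List.pyGetD acc (-1) 0 ≠ c
    · rw [if_pos hc]
      exact ih _ (by simp)
    · rw [if_neg hc]
      exact ih _ h

-- ===== VERDICT (by name: the statement is the Claim_ definition above) =====
theorem compute_answer_spec : Claim_equal_compute_answer := by
  intro n_input m_input c_list _
  unfold Spec_compute_answer compute_answer compute_answer_alt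
  cases c_list with
  | nil => rfl
  | cons c0 cs =>
    simp only [List.map_cons]
    set C2 := (cs.map (fun x => x - 1)).foldl
      (fun acc c => if PySem.List.pyGetD acc (-1) 0 ≠ c then acc ++ [c] else acc) [c0 - 1] with hC2
    by_cases h1 : PySem.List.len C2 > 2 * n_input
    · rw [if_pos h1, if_pos h1]
    · rw [if_neg h1, if_neg h1]
      cases hbp : pvBuildPos C2 n_input (PySem.List.pyRange 0 (PySem.List.len C2))
          ((PySem.List.pyRange 0 n_input).map (fun _ => [])) with
      | none => rfl
      | some pos =>
        simp only []
        by_cases h2 : (PySem.List.pyRange 0 n_input 1).all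
            (fun color => !(PySem.List.pyGetD pos color []).isEmpty)
        · rw [if_pos h2, if_pos h2]
          have hC2ne : C2 ≠ [] := pv_compress_ne_nil _ _ (by simp)
          have hlen0 : 0 < C2.length := List.length_pos_of_ne_nil hC2ne
          have hlen : PySem.List.len C2 = (C2.length : Int) := PySem.List.len_eq C2
          have hpos : ∀ r ∈ pos, ∀ e ∈ r, 0 ≤ e ∧ e < PySem.List.len C2 := by
            refine pvBuildPos_rows C2 n_input (fun e => 0 ≤ e ∧ e < PySem.List.len C2) _ _ _ hbp ?_ ?_
            · intro r hr e he
              obtain ⟨a, _, rfl⟩ := List.mem_map.1 hr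
              cases he
            · intro e he
              have := PySem.List.mem_pyRange_one.1 he
              exact ⟨this.1, this.2⟩
          have hB := pvF_spec C2 pos hpos (PySem.List.len C2).toNat PySem.Dict.empty 0
            (PySem.List.len C2) le_rfl le_rfl (by omega)
            (by intro x y v h; rw [PySem.Dict.get?_empty] at h; cases h)
          rw [hB.1]
          have hA := pvOuter C2 pos hpos (PySem.List.len C2).toNat 1
            ((PySem.List.pyRange 0 (PySem.List.len C2 + 1) 1).map
              (fun _ => PySem.List.pyRepeat [(1 : Int)] (PySem.List.len C2 + 1)))
            le_rfl (by omega) (pvDP0_shape C2) (pvDP0_inv C2 pos)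
          rw [hA 0 (PySem.List.len C2) le_rfl (by omega) (by omega) le_rfl,
            if_pos (Or.inl (by omega))]
          have : (PySem.List.len C2 - 0).toNat = (PySem.List.len C2).toNat := by omega
          rw [this]
        · rw [if_neg h2, if_neg h2]
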